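-- pv_equiv track=rewrite | github.com/jramaswami/advent-of-code-2024-python | src/day19.py | ways_to_make_design
-- ===== SOURCE A (Python) =====
-- import functools
--
-- def ways_to_make_design(towel_patterns, design):
--
--     @functools.cache
--     def rec(i):
--         if i == len(design):
--             return 1
--
--         result = 0
--         for p in towel_patterns:
--             t = len(p)
--             if design[i:i+t] == p:
--                 result += rec(i+t)
--         return result
--
--     return rec(0)
-- ===== SOURCE B (Python) =====
-- def ways_to_make_design(towel_patterns, design):
--     counts = {}
--     lengths = set()
--     for p in towel_patterns:
--         counts[p] = counts.get(p, 0) + 1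
--         lengths.add(len(p))
--     n = len(design)
--     dp = [0] * (n + 1)
--     dp[n] = 1
--     for i in range(n - 1, -1, -1):
--         total = 0
--         for t in lengths:
--             if i + t <= n:
--                 total += counts.get(design[i:i + t], 0) * dp[i + t]
--         dp[i] = total
--     return dp[0]
-- ===== Notes on version B (the rewrite author's own statement) =====
-- stated objective: faster
-- what changed: Replaces the top-down memoized recursion that scans every pattern at every position with a bottom-up array DP whose inner loop runs over the distinct pattern LENGTHS only, looking the substring up in a multiplicity counter built once.
import Mathlib
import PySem

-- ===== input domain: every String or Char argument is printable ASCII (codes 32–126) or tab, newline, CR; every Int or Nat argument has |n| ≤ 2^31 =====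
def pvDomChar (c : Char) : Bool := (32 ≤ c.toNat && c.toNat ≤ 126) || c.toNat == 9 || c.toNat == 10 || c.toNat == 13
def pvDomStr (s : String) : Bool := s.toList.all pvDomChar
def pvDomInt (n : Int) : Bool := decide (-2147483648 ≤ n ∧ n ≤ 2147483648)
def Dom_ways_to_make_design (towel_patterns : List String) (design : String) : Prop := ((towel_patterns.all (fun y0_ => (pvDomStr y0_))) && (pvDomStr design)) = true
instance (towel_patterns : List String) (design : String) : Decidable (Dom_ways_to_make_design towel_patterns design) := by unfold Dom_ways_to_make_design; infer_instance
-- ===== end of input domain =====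

-- ===== PORT A =====
def waysRecA (tps : List String) (cs : List Char) (fuel i : Nat) : Int :=
  match fuel with
  | 0 => 0  -- fuel guard only: never reached under Pre_ (each recursive call advances i by ≥ 1)
  | f + 1 =>
    if i = cs.length then 1
    else
      tps.foldl (fun result p =>
        let t : Nat := p.toList.length
        if PySem.List.slice cs (some (i : Int)) (some ((i : Int) + (t : Int))) = p.toList
        then result + waysRecA tps cs f (i + t)
        else result) 0

def ways_to_make_design (towel_patterns : List String) (design : String) : Int :=
  waysRecA towel_patterns design.toList (design.toList.length + 1) 0


-- ===== PORT B =====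
def ways_to_make_design_alt (towel_patterns : List String) (design : String) : Int :=
  let counts : PySem.Dict (List Char) Int :=
    towel_patterns.foldl (fun d p => d.insert p.toList (d.getD p.toList 0 + 1)) PySem.Dict.empty
  let lengths : PySem.Set Int :=
    towel_patterns.foldl (fun s p => PySem.Set.add s (p.toList.length : Int)) PySem.Set.empty
  let cs := design.toList
  let n := cs.length
  -- dp = [0] * (n + 1); dp[n] = 1
  let dp0 : List Int := PySem.List.pySetD (List.replicate (n + 1) 0) (n : Int) 1
  let dp := (PySem.List.pyRange ((n : Int) - 1) (-1) (-1)).foldl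
    (fun dp i =>
      let total := lengths.foldl (fun total t =>
        if i + t ≤ (n : Int) then
          -- dp[i+t] is in range whenever this branch can contribute (i + t ≤ n)
          total + counts.getD (PySem.List.slice cs (some i) (some (i + t))) 0
                    * PySem.List.pyGetD dp (i + t) 0
        else total) 0
      PySem.List.pySetD dp i total) dp0
  PySem.List.pyGetD dp 0 0


-- ===== PRECONDITION & SPEC =====
-- Pre_ excludes only inputs where A raises: with an empty-string pattern and a nonempty design,
-- A's rec(i) calls rec(i) and dies with RecursionError.
def Pre_ways_to_make_design (towel_patterns : List String) (design : String) : Prop :=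
  "" ∈ towel_patterns → design = ""
instance (towel_patterns : List String) (design : String) : Decidable (Pre_ways_to_make_design towel_patterns design) := by unfold Pre_ways_to_make_design; infer_instance
def pvWitness_ways_to_make_design : List String × String := (["a", "ab", "b"], "ab")

def Spec_ways_to_make_design (towel_patterns : List String) (design : String) (out : Int) : Prop := out = ways_to_make_design_alt towel_patterns design
instance (towel_patterns : List String) (design : String) (out : Int) : Decidable (Spec_ways_to_make_design towel_patterns design out) := by unfold Spec_ways_to_make_design; infer_instance

-- ===== CLAIM (what is proved, stated in full; the proofs are below) =====
def Claim_equal_ways_to_make_design : Prop := ∀ (towel_patterns : List String) (design : String), Dom_ways_to_make_design towel_patterns design → Pre_ways_to_make_design towel_patterns design → Spec_ways_to_make_design towel_patterns design (ways_to_make_design towel_patterns design)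

-- ===== LEMMAS AND PROOFS =====

-- proof-side name for B's per-iteration dp update (exactly the loop body of the port)
def Bstep (tps : List String) (cs : List Char) (dp : List Int) (i : Int) : List Int :=
  PySem.List.pySetD dp i
    ((tps.foldl (fun s p => PySem.Set.add s ((p.toList.length : Int))) PySem.Set.empty).foldl
      (fun total t =>
        if i + t ≤ (cs.length : Int) then
          total + (tps.foldl (fun d p => d.insert p.toList (d.getD p.toList 0 + 1)) PySem.Dict.empty).getD
                    (PySem.List.slice cs (some i) (some (i + t))) 0
                  * PySem.List.pyGetD dp (i + t) 0
        else total) 0)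

lemma alt_eq (tps : List String) (design : String) :
    ways_to_make_design_alt tps design
      = PySem.List.pyGetD
          ((PySem.List.pyRange ((design.toList.length : Int) - 1) (-1) (-1)).foldl (Bstep tps design.toList)
            (PySem.List.pySetD (List.replicate (design.toList.length + 1) (0 : Int)) (design.toList.length : Int) 1)) 0 0 := rfl

lemma toList_ne_nil {p : String} (h : p ≠ "") : p.toList ≠ [] := by
  simpa using h

lemma slice_eq_imp_le {cs : List Char} {m : Nat} {x : List Char} (hm : m ≤ cs.length)
    (e : PySem.List.slice cs (some (m : Int)) (some ((m : Int) + (x.length : Int))) = x) :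
    m + x.length ≤ cs.length := by
  have hl := congrArg List.length e
  rw [PySem.List.slice_natCast_add] at hl
  simp [List.length_take, List.length_drop] at hl
  omega

-- fuel irrelevance for the port of A (under Pre_: no empty pattern)
lemma recA_fuel (tps : List String) (cs : List Char) (h : "" ∉ tps) :
    ∀ (f1 f2 i : Nat), cs.length - i < f1 → cs.length - i < f2 →
      waysRecA tps cs f1 i = waysRecA tps cs f2 i := by
  intro f1
  induction f1 with
  | zero => intro f2 i h1 _; omega
  | succ k ih =>
    intro f2 i h1 h2
    match f2, h2 with
    | m + 1, h2 =>
      simp only [waysRecA]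
      by_cases hi : i = cs.length
      · simp [hi]
      · simp only [if_neg hi]
        apply PySem.List.foldl_congr_mem
        intro acc p hp
        by_cases hc : PySem.List.slice cs (some (i : Int)) (some ((i : Int) + (p.toList.length : Int))) = p.toList
        · rw [if_pos hc, if_pos hc]
          have hp0 : p.toList ≠ [] := toList_ne_nil (fun e => h (e ▸ hp))
          have ht1 : 1 ≤ p.toList.length := List.length_pos_iff.mpr hp0
          have hle : i + p.toList.length ≤ cs.length := by
            have hi' : i ≤ cs.length := by
              by_contra hgt
              have : cs.length ≤ i := by omega
              have : cs.length - i = 0 := by omega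
              -- slice with i past the end is [], contradicting hc
              have hdn : cs.drop i = [] := List.drop_eq_nil_of_le (by omega)
              rw [PySem.List.slice_natCast_add, hdn] at hc
              simp at hc
              rw [hc] at hp
              exact h hp
            exact slice_eq_imp_le hi' hc
          congr 1
          exact ih m (i + p.toList.length) (by omega) (by omega)
        · rw [if_neg hc, if_neg hc]

-- one unfolding of A's recursion as a sum over the pattern list
lemma recA_succ_sum (tps : List String) (cs : List Char) (i f : Nat) (hi : i ≠ cs.length) :
    waysRecA tps cs (f + 1) i
      = (tps.map (fun p =>
          if PySem.List.slice cs (some (i : Int)) (some ((i : Int) + (p.toList.length : Int))) = p.toList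
          then waysRecA tps cs f (i + p.toList.length) else 0)).sum := by
  simp only [waysRecA, if_neg hi]
  rw [PySem.List.foldl_congr_mem _ _
    (fun acc p => acc +
      (if PySem.List.slice cs (some (i : Int)) (some ((i : Int) + (p.toList.length : Int))) = p.toList
       then waysRecA tps cs f (i + p.toList.length) else 0)) 0
    (by intro acc p _; split_ifs <;> simp_all)]
  rw [PySem.List.foldl_add]
  simp

lemma counts_getD (tps : List String) (v : List Char) :
    (tps.foldl (fun d p => d.insert p.toList (d.getD p.toList 0 + 1)) PySem.Dict.empty).getD v 0
      = ((tps.map String.toList).count v : Int) := by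
  have h := List.foldl_map (f := String.toList)
    (g := fun (d : PySem.Dict (List Char) Int) x => d.insert x (d.getD x 0 + 1))
    (l := tps) (init := (PySem.Dict.empty : PySem.Dict (List Char) Int))
  rw [← h, PySem.Dict.getD_foldl_insert_add_one]
  simp

lemma lengths_eq (tps : List String) :
    (tps.foldl (fun s p => PySem.Set.add s ((p.toList.length : Int))) PySem.Set.empty)
      = PySem.Set.ofList (tps.map (fun p => (p.toList.length : Int))) := by
  rw [← PySem.Set.update_nil_left, PySem.Set.update_map_eq_foldl_add]
  rfl

lemma ofList_append_singleton {α : Type} [BEq α] (l : List α) (a : α) :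
    PySem.Set.ofList (l ++ [a]) = PySem.Set.add (PySem.Set.ofList l) a := by
  simp [PySem.Set.ofList, PySem.Set.add]

lemma sum_ite_single (l : List Int) (t0 c : Int) (hnd : l.Nodup) :
    (l.map (fun t => if t = t0 then c else 0)).sum = if t0 ∈ l then c else 0 := by
  induction l with
  | nil => simp
  | cons a l ih =>
    rcases List.nodup_cons.mp hnd with ⟨ha, hl⟩
    simp only [List.map_cons, List.sum_cons, List.mem_cons]
    by_cases hat : a = t0
    · subst hat
      rw [if_pos rfl, ih hl, if_neg ha, if_pos (Or.inl rfl)]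
      ring
    · rw [if_neg hat, ih hl]
      by_cases hm : t0 ∈ l
      · rw [if_pos hm, if_pos (Or.inr hm)]
        ring
      · rw [if_neg hm, if_neg (by rintro (h | h); exact hat h.symm; exact hm h)]
        ring

-- THE regrouping identity: summing over distinct pattern lengths with multiplicity counts
-- equals summing over the pattern list itself.
lemma key_sum (cs : List Char) (m : Nat) (hm : m ≤ cs.length) (tl : List (List Char)) (f : Int → Int) :
    ((PySem.Set.ofList (tl.map (fun l => (l.length : Int)))).map
      (fun t => if (m : Int) + t ≤ (cs.length : Int)
        then ((tl.count (PySem.List.slice cs (some (m : Int)) (some ((m : Int) + t)))) : Int) * f ((m : Int) + t)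
        else 0)).sum
    = (tl.map (fun l =>
        if PySem.List.slice cs (some (m : Int)) (some ((m : Int) + (l.length : Int))) = l
        then f ((m : Int) + (l.length : Int)) else 0)).sum := by
  induction tl using List.reverseRecOn with
  | nil => simp [PySem.Set.ofList]
  | append_singleton tl x ih =>
    -- notation
    set t0 : Int := (x.length : Int) with ht0def
    set Sset := PySem.Set.ofList (tl.map (fun l => (l.length : Int))) with hS
    set ψ : Int := (if PySem.List.slice cs (some (m : Int)) (some ((m : Int) + (x.length : Int))) = x
        then f ((m : Int) + (x.length : Int)) else 0) with hψ
    have hset : PySem.Set.ofList ((tl ++ [x]).map (fun l => (l.length : Int)))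
        = PySem.Set.add Sset t0 := by
      rw [List.map_append, List.map_cons, List.map_nil, ofList_append_singleton]
    -- the new count function pointwise on old set elements
    have hpoint : ∀ t ∈ Sset,
        (if (m : Int) + t ≤ (cs.length : Int)
          then (((tl ++ [x]).count (PySem.List.slice cs (some (m : Int)) (some ((m : Int) + t)))) : Int) * f ((m : Int) + t)
          else 0)
        = (if (m : Int) + t ≤ (cs.length : Int)
            then ((tl.count (PySem.List.slice cs (some (m : Int)) (some ((m : Int) + t)))) : Int) * f ((m : Int) + t)
            else 0) + (if t = t0 then ψ else 0) := by
      intro t htmem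
      rcases (PySem.Set.mem_ofList _ _).mp htmem with htl
      rcases List.mem_map.mp htl with ⟨l, hlmem, rfl⟩
      by_cases hle : (m : Int) + (l.length : Int) ≤ (cs.length : Int)
      · rw [if_pos hle, if_pos hle]
        have hcast : ((m : Int) + (l.length : Int)) = ((m + l.length : Nat) : Int) := by push_cast; ring
        have hslen : (PySem.List.slice cs (some (m : Int)) (some ((m : Int) + (l.length : Int)))).length = l.length := by
          rw [PySem.List.slice_natCast_add]
          simp [List.length_take, List.length_drop]
          omega
        by_cases hsx : PySem.List.slice cs (some (m : Int)) (some ((m : Int) + (l.length : Int))) = x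
        · -- x matches at this length, so x.length = l.length and t = t0
          have hxl : x.length = l.length := by rw [← hsx, hslen]
          have htt0 : ((l.length : Int)) = t0 := by rw [ht0def, hxl]
          rw [List.count_append]
          have hc1 : List.count (PySem.List.slice cs (some (m : Int)) (some ((m : Int) + (l.length : Int)))) [x] = 1 := by
            simp [hsx]
          have hψval : ψ = f ((m : Int) + (l.length : Int)) := by
            rw [hψ]
            simp only [hxl]
            rw [if_pos hsx]
          rw [hc1, if_pos htt0, hψval]
          push_cast
          ring
        · -- x does not match: counts agree; and if t = t0 the ψ term is 0 too
          rw [List.count_append]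
          have hc0 : List.count (PySem.List.slice cs (some (m : Int)) (some ((m : Int) + (l.length : Int)))) [x] = 0 := by
            simp [List.count_singleton]
            intro e
            exact hsx e.symm
          rw [hc0]
          by_cases htt0 : ((l.length : Int)) = t0
          · rw [if_pos htt0]
            have hxl : x.length = l.length := by rw [ht0def] at htt0; omega
            have hψ0 : ψ = 0 := by
              rw [hψ]
              simp only [hxl]
              rw [if_neg hsx]
            rw [hψ0]
            push_cast
            ring
          · rw [if_neg htt0]
            push_cast
            ring
      · -- past the end: both guarded terms are 0; ψ is 0 as well when t = t0
        rw [if_neg hle, if_neg hle]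
        by_cases htt0 : ((l.length : Int)) = t0
        · rw [if_pos htt0]
          have hxl : x.length = l.length := by rw [ht0def] at htt0; omega
          have hψ0 : ψ = 0 := by
            rw [hψ]
            have : ¬ PySem.List.slice cs (some (m : Int)) (some ((m : Int) + (x.length : Int))) = x := by
              intro e
              have := slice_eq_imp_le hm e
              rw [hxl] at this
              have : (m : Int) + (l.length : Int) ≤ (cs.length : Int) := by push_cast; omega
              exact hle this
            rw [if_neg this]
          rw [hψ0]
          ring
        · rw [if_neg htt0]
          ring
    -- now both cases on whether t0 is already present
    rw [hset, List.map_append, List.sum_append]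
    by_cases hmem : t0 ∈ Sset
    · have hadd : PySem.Set.add Sset t0 = Sset := by
        simp [PySem.Set.add, hmem]
      rw [hadd]
      rw [List.map_congr_left hpoint, PySem.List.sum_map_add_int, ih,
        sum_ite_single Sset t0 ψ (by rw [hS]; exact PySem.Set.nodup_ofList _), if_pos hmem]
      simp [hψ]
    · have hadd : PySem.Set.add Sset t0 = Sset ++ [t0] := by
        simp [PySem.Set.add, hmem]
      rw [hadd, List.map_append, List.sum_append]
      rw [List.map_congr_left hpoint, PySem.List.sum_map_add_int, ih,
        sum_ite_single Sset t0 ψ (by rw [hS]; exact PySem.Set.nodup_ofList _), if_neg hmem]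
      -- the appended element contributes exactly ψ
      have hnew : (if (m : Int) + t0 ≤ (cs.length : Int)
          then (((tl ++ [x]).count (PySem.List.slice cs (some (m : Int)) (some ((m : Int) + t0)))) : Int) * f ((m : Int) + t0)
          else 0) = ψ := by
        rw [ht0def]
        by_cases hle : (m : Int) + (x.length : Int) ≤ (cs.length : Int)
        · rw [if_pos hle]
          have hslen : (PySem.List.slice cs (some (m : Int)) (some ((m : Int) + (x.length : Int)))).length = x.length := by
            rw [PySem.List.slice_natCast_add]
            simp [List.length_take, List.length_drop]
            omega
          have hcount0 : List.count (PySem.List.slice cs (some (m : Int)) (some ((m : Int) + (x.length : Int)))) tl = 0 := by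
            rw [List.count_eq_zero]
            intro hmemtl
            apply hmem
            rw [hS, PySem.Set.mem_ofList]
            apply List.mem_map.mpr
            exact ⟨_, hmemtl, by rw [hslen, ht0def]⟩
          rw [List.count_append, hcount0]
          by_cases hsx : PySem.List.slice cs (some (m : Int)) (some ((m : Int) + (x.length : Int))) = x
          · have hc1 : List.count (PySem.List.slice cs (some (m : Int)) (some ((m : Int) + (x.length : Int)))) [x] = 1 := by
              simp [hsx]
            rw [hc1, hψ, if_pos hsx]
            push_cast
            ring
          · have hc0 : List.count (PySem.List.slice cs (some (m : Int)) (some ((m : Int) + (x.length : Int)))) [x] = 0 := by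
              simp [List.count_singleton]
              intro e
              exact hsx e.symm
            rw [hc0, hψ, if_neg hsx]
            push_cast
            ring
        · rw [if_neg hle, hψ]
          have : ¬ PySem.List.slice cs (some (m : Int)) (some ((m : Int) + (x.length : Int))) = x := by
            intro e
            have := slice_eq_imp_le hm e
            exact hle (by push_cast; omega)
          rw [if_neg this]
      rw [List.map_singleton, List.sum_singleton, hnew]
      simp [hψ]

-- one loop iteration establishes A's value at index m and keeps everything above m intact
lemma step_correct (tps : List String) (cs : List Char) (h : "" ∉ tps) (m : Nat) (dp : List Int)
    (hlen : dp.length = cs.length + 1) (hm : m < cs.length)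
    (hdp : ∀ j : Nat, m < j → j ≤ cs.length → dp.getD j 0 = waysRecA tps cs (cs.length + 1) j) :
    (Bstep tps cs dp (m : Int)).length = cs.length + 1 ∧
    ∀ j : Nat, m ≤ j → j ≤ cs.length →
      (Bstep tps cs dp (m : Int)).getD j 0 = waysRecA tps cs (cs.length + 1) j := by
  have htot :
      ((tps.foldl (fun s p => PySem.Set.add s ((p.toList.length : Int))) PySem.Set.empty).foldl
        (fun total t =>
          if (m : Int) + t ≤ (cs.length : Int) then
            total + (tps.foldl (fun d p => d.insert p.toList (d.getD p.toList 0 + 1)) PySem.Dict.empty).getD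
                      (PySem.List.slice cs (some (m : Int)) (some ((m : Int) + t))) 0
                    * PySem.List.pyGetD dp ((m : Int) + t) 0
          else total) 0) = waysRecA tps cs (cs.length + 1) m := by
    rw [lengths_eq]
    rw [PySem.List.foldl_congr_mem _ _
      (fun total t => total +
        (if (m : Int) + t ≤ (cs.length : Int) then
          (((tps.map String.toList).count (PySem.List.slice cs (some (m : Int)) (some ((m : Int) + t)))) : Int)
            * PySem.List.pyGetD dp ((m : Int) + t) 0
         else 0)) 0
      (by
        intro acc t _
        by_cases hc : (m : Int) + t ≤ (cs.length : Int) <;> simp [hc, counts_getD])]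
    rw [PySem.List.foldl_add]
    rw [show (tps.map (fun p => (p.toList.length : Int))) = ((tps.map String.toList).map (fun l => (l.length : Int))) by
      rw [List.map_map]; rfl]
    rw [key_sum cs m (by omega) (tps.map String.toList) (fun v => PySem.List.pyGetD dp v 0)]
    rw [List.map_map]
    have hfe : cs.length + 1 = cs.length + 1 := rfl
    rw [recA_succ_sum tps cs m cs.length (by omega)]
    rw [zero_add]
    apply congrArg
    apply List.map_congr_left
    intro p hp
    simp only [Function.comp]
    by_cases hc : PySem.List.slice cs (some (m : Int)) (some ((m : Int) + (p.toList.length : Int))) = p.toList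
    · rw [if_pos hc, if_pos hc]
      have hp0 : p.toList ≠ [] := toList_ne_nil (fun e => h (e ▸ hp))
      have ht1 : 1 ≤ p.toList.length := List.length_pos_iff.mpr hp0
      have hle : m + p.toList.length ≤ cs.length := slice_eq_imp_le (by omega) hc
      have hcast : ((m : Int) + (p.toList.length : Int)) = ((m + p.toList.length : Nat) : Int) := by push_cast; ring
      rw [hcast, PySem.List.pyGetD_natCast]
      rw [hdp (m + p.toList.length) (by omega) hle]
      exact recA_fuel tps cs h (cs.length + 1) cs.length (m + p.toList.length) (by omega) (by omega)
    · rw [if_neg hc, if_neg hc]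
  constructor
  · simp [Bstep, PySem.List.length_pySetD, hlen]
  · intro j hj1 hj2
    simp only [Bstep]
    rw [PySem.List.pySetD_natCast, htot]
    by_cases hjm : j = m
    · subst hjm
      rw [List.getD_eq_getElem?_getD, List.getElem?_set]
      simp [hlen, hj2]
    · rw [List.getD_eq_getElem?_getD, List.getElem?_set]
      rw [if_neg (fun e => hjm e.symm)]
      rw [← List.getD_eq_getElem?_getD]
      exact hdp j (by omega) hj2

lemma loop_inv (tps : List String) (cs : List Char) (h : "" ∉ tps) :
    ∀ (m : Nat) (dp : List Int), dp.length = cs.length + 1 → m < cs.length →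
      (∀ j : Nat, m < j → j ≤ cs.length → dp.getD j 0 = waysRecA tps cs (cs.length + 1) j) →
      ∀ j : Nat, j ≤ cs.length →
        ((PySem.List.pyRange (m : Int) (-1) (-1)).foldl (Bstep tps cs) dp).getD j 0
          = waysRecA tps cs (cs.length + 1) j := by
  intro m
  induction m with
  | zero =>
    intro dp hlen hm hdp j hj
    rw [PySem.List.pyRange_neg_one_cons (by omega)]
    rw [show ((0 : Nat) : Int) - 1 = (-1 : Int) by norm_num]
    rw [PySem.List.pyRange_neg_one_eq_nil (le_refl _)]
    simp only [List.foldl_cons, List.foldl_nil]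
    exact (step_correct tps cs h 0 dp hlen hm hdp).2 j (Nat.zero_le j) hj
  | succ k ih =>
    intro dp hlen hm hdp j hj
    rw [PySem.List.pyRange_neg_one_cons (by omega)]
    simp only [List.foldl_cons]
    have hs := step_correct tps cs h (k + 1) dp hlen hm hdp
    rw [show ((k + 1 : Nat) : Int) - 1 = ((k : Nat) : Int) by push_cast; ring]
    exact ih (Bstep tps cs dp ((k + 1 : Nat) : Int)) hs.1 (by omega)
      (fun j hj1 hj2 => hs.2 j (by omega) hj2) j hj

-- ===== VERDICT (by name: the statement is the Claim_ definition above) =====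
theorem ways_to_make_design_spec : Claim_equal_ways_to_make_design := by
  intro tps design _ hpre
  unfold Spec_ways_to_make_design
  by_cases h0 : design.toList = []
  · simp only [ways_to_make_design, alt_eq, h0]
    simp only [List.length_nil]
    rw [show ((0 : Nat) : Int) - 1 = (-1 : Int) by norm_num]
    rw [PySem.List.pyRange_neg_one_eq_nil (le_refl _)]
    simp only [List.foldl_nil]
    simp [waysRecA, PySem.List.pyGetD_zero]
    try decide
  · have hne : design ≠ "" := by
      intro e
      rw [e] at h0
      exact h0 rfl
    have h : "" ∉ tps := fun hmem => hne (hpre hmem)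
    have hn : 0 < design.toList.length := List.length_pos_iff.mpr h0
    rw [alt_eq]
    rw [show ((design.toList.length : Int)) - 1 = ((design.toList.length - 1 : Nat) : Int) by
      rw [Nat.cast_sub hn]; norm_num]
    rw [PySem.List.pyGetD_zero]
    have hdp0len : (PySem.List.pySetD (List.replicate (design.toList.length + 1) (0 : Int))
        (design.toList.length : Int) 1).length = design.toList.length + 1 := by
      simp
    have hdp0 : ∀ j : Nat, design.toList.length - 1 < j → j ≤ design.toList.length →
        (PySem.List.pySetD (List.replicate (design.toList.length + 1) (0 : Int))
          (design.toList.length : Int) 1).getD j 0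
          = waysRecA tps design.toList (design.toList.length + 1) j := by
      intro j hj1 hj2
      have hjn : j = design.toList.length := by omega
      subst hjn
      rw [PySem.List.pySetD_natCast, List.getD_eq_getElem?_getD, List.getElem?_set]
      simp only [waysRecA]
      simp
    show waysRecA tps design.toList (design.toList.length + 1) 0 = _
    exact (loop_inv tps design.toList h (design.toList.length - 1)
      _ hdp0len (by omega) hdp0 0 (Nat.zero_le _)).symm
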